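-- pv_equiv track=rewrite | github.com/ggalancs/hfl | src/hfl/hub/resolver.py | _select_gguf
-- ===== SOURCE A (Python) =====
-- def _select_gguf(files: list[str], quant: str | None) -> str:
--     """Select the most appropriate GGUF file."""
--     if quant:
--         quant_upper = quant.upper()
--         for f in files:
--             if quant_upper in f.upper():
--                 return f
--
--     # Default priority: Q4_K_M > Q5_K_M > Q4_K_S > first file
--     priority = ["Q4_K_M", "Q5_K_M", "Q4_K_S", "Q5_K_S", "Q6_K", "Q8_0"]
--     for q in priority:
--         for f in files:
--             if q in f.upper():
--                 return f
--
--     return files[0]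
-- ===== SOURCE B (Python) =====
-- def _select_gguf(files: list[str], quant: str | None) -> str:
--     """Select the most appropriate GGUF file."""
--     if quant:
--         quant_upper = quant.upper()
--         match = next((f for f in files if quant_upper in f.upper()), None)
--         if match is not None:
--             return match
--
--     priority = ["Q4_K_M", "Q5_K_M", "Q4_K_S", "Q5_K_S", "Q6_K", "Q8_0"]
--
--     def score(f: str) -> int:
--         u = f.upper()
--         return next((i for i, q in enumerate(priority) if q in u), len(priority))
--
--     if files:
--         best = min(files, key=score)
--         if score(best) < len(priority):
--             return best
--
--     return files[0]
-- ===== Notes on version B (the rewrite author's own statement) =====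
-- stated objective: alternative
-- what changed: The priority default is recomputed as a score function (index of the first matching priority string) plus a single stable argmin over the files, replacing A's nested priority-by-priority rescans of the file list.
import Mathlib
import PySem

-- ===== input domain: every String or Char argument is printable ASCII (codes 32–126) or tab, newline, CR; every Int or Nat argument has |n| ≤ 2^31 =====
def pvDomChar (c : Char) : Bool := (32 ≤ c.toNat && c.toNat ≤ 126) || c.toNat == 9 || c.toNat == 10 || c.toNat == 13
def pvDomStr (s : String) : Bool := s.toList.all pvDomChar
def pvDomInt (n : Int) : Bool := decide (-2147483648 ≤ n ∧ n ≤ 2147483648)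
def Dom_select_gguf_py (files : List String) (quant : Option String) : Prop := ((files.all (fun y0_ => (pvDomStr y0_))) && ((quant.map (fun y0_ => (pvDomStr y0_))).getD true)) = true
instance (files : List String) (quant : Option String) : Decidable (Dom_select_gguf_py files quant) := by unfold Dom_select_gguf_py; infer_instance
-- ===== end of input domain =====

-- B replaces A's nested priority-by-priority rescans with a score function and one stable argmin
-- (min with key), same results; equivalence is about the return value, neither mutates anything.

-- ===== PORT A =====

-- the shared default priority list (a literal constant in both Pythons)
def pvPriority : List String := ["Q4_K_M", "Q5_K_M", "Q4_K_S", "Q5_K_S", "Q6_K", "Q8_0"]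

-- 'for f in files: if quant_upper in f.upper(): return f' (this loop is textually identical in A and B)
def pvQuantLoop : List String → String → Option String
  | [], _ => none
  | f :: rest, qu =>
      if PySem.Str.isIn qu (PySem.Str.upper f) then some f else pvQuantLoop rest qu

-- A's inner loop: 'for f in files: if q in f.upper(): return f'
def pvFilesLoop : List String → String → Option String
  | [], _ => none
  | f :: rest, q =>
      if PySem.Str.isIn q (PySem.Str.upper f) then some f else pvFilesLoop rest q

-- A's outer loop: 'for q in priority: …'
def pvPriorityLoop : List String → List String → Option String
  | [], _ => none
  | q :: qs, files =>
      match pvFilesLoop files q with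
      | some f => some f
      | none => pvPriorityLoop qs files

def select_gguf_py (files : List String) (quant : Option String) : String :=
  let fromQuant : Option String :=
    match quant with
    | some q => if q = "" then none else pvQuantLoop files (PySem.Str.upper q)  -- 'if quant:' truthiness
    | none => none
  match fromQuant with
  | some f => f
  | none =>
      match pvPriorityLoop pvPriority files with
      | some f => f
      | none => (PySem.List.pyGet? files 0).getD ""  -- files[0]; none = IndexError, excluded by Pre_

-- ===== PORT B =====

-- B's score: next((i for i, q in enumerate(priority) if q in u), len(priority))
def pvScoreAux (u : String) : List String → Nat
  | [] => 0
  | q :: qs => if PySem.Str.isIn q u then 0 else 1 + pvScoreAux u qs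

def pvScore (f : String) : Nat := pvScoreAux (PySem.Str.upper f) pvPriority

def select_gguf_py_alt (files : List String) (quant : Option String) : String :=
  let fromQuant : Option String :=
    match quant with
    | some q =>  -- 'if quant:' truthiness; next((f for f in files if quant_upper in f.upper()), None)
        if q = "" then none
        else List.find? (fun f => PySem.Str.isIn (PySem.Str.upper q) (PySem.Str.upper f)) files
    | none => none
  match fromQuant with
  | some f => f
  | none =>
      match PySem.List.min? files pvScore with   -- min(files, key=score): FIRST minimal element
      | some best =>
          if pvScore best < pvPriority.length then best
          else (PySem.List.pyGet? files 0).getD ""  -- files[0]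
      | none => (PySem.List.pyGet? files 0).getD ""  -- files was empty: files[0] (IndexError, outside Pre_)

-- ===== PRECONDITION & SPEC =====
-- Pre_ excludes exactly the empty file list, on which the Python A raises IndexError at 'files[0]'.
def Pre_select_gguf_py (files : List String) (quant : Option String) : Prop := files ≠ []
instance (files : List String) (quant : Option String) : Decidable (Pre_select_gguf_py files quant) := by unfold Pre_select_gguf_py; infer_instance
def pvWitness_select_gguf_py : List String × Option String := (["model-Q4_K_M.gguf", "model-Q8_0.gguf"], some "q8")

def Spec_select_gguf_py (files : List String) (quant : Option String) (out : String) : Prop := out = select_gguf_py_alt files quant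
instance (files : List String) (quant : Option String) (out : String) : Decidable (Spec_select_gguf_py files quant out) := by unfold Spec_select_gguf_py; infer_instance

-- ===== CLAIM (what is proved, stated in full; the proofs are below) =====
def Claim_equal_select_gguf_py : Prop := ∀ (files : List String) (quant : Option String), Dom_select_gguf_py files quant → Pre_select_gguf_py files quant → Spec_select_gguf_py files quant (select_gguf_py files quant)

-- ===== LEMMAS AND PROOFS =====

-- running minimum over the tail, first-wins on ties: min? (x :: xs) key = some (pvM1 key x xs)
def pvM1 (key : String → Nat) : String → List String → String
  | x, [] => x
  | x, y :: ys => if key y < key x then pvM1 key y ys else pvM1 key x ys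

theorem min?_eq_pvM1 (key : String → Nat) (xs : List String) : ∀ x : String,
    PySem.List.min? (x :: xs) key = some (pvM1 key x xs) := by
  induction xs with
  | nil => intro x; rfl
  | cons y ys ih =>
      intro x
      have hstep : PySem.List.min? (x :: y :: ys) key =
          PySem.List.min? ((if key y < key x then y else x) :: ys) key := by
        simp only [PySem.List.min?, List.foldl]
        by_cases h : key y < key x <;> simp [h]
      rw [hstep]
      by_cases h : key y < key x <;> simp only [pvM1, h, if_pos, ite_false] <;> simp [ih]

theorem pvM1_mem (key : String → Nat) (xs : List String) : ∀ x, pvM1 key x xs ∈ x :: xs := by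
  induction xs with
  | nil => intro x; simp [pvM1]
  | cons y ys ih =>
      intro x
      simp only [pvM1]
      by_cases h : key y < key x
      · rw [if_pos h]
        rcases List.mem_cons.mp (ih y) with h' | h' <;> simp [h']
      · rw [if_neg h]
        rcases List.mem_cons.mp (ih x) with h' | h' <;> simp [h']

theorem pvM1_congr (k1 k2 : String → Nat) (xs : List String) : ∀ x,
    (∀ y ∈ x :: xs, k1 y = k2 y) → pvM1 k1 x xs = pvM1 k2 x xs := by
  induction xs with
  | nil => intro x _; rfl
  | cons y ys ih =>
      intro x h
      have hx := h x (by simp)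
      have hy := h y (by simp)
      simp only [pvM1, hx, hy]
      by_cases hc : k2 y < k2 x <;> simp only [hc, if_pos, ite_false] <;>
        exact ih _ (fun z hz => h z (by rcases List.mem_cons.mp hz with h' | h' <;> simp [h']))

theorem pvM1_shift (k : String → Nat) (xs : List String) : ∀ x,
    pvM1 (fun f => 1 + k f) x xs = pvM1 k x xs := by
  induction xs with
  | nil => intro x; rfl
  | cons y ys ih =>
      intro x
      simp only [pvM1, Nat.add_lt_add_iff_left]
      by_cases h : k y < k x <;> simp [h, ih]

theorem pvM1_zero (key : String → Nat) (xs : List String) : ∀ x, key x = 0 → pvM1 key x xs = x := by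
  induction xs with
  | nil => intro x _; rfl
  | cons y ys ih =>
      intro x hx
      simp only [pvM1, hx]
      exact ih _ hx

theorem pvM1_first_zero (key : String → Nat) (xs : List String) : ∀ x z, key x ≠ 0 →
    List.find? (fun f => key f == 0) xs = some z → pvM1 key x xs = z := by
  induction xs with
  | nil => intro x z _ h; simp at h
  | cons y ys ih =>
      intro x z hx h
      by_cases hy : key y = 0
      · have hz : y = z := by
          rw [List.find?_cons_of_pos (by simp [hy])] at h
          exact Option.some.inj h
        subst hz
        have hlt : key y < key x := by omega
        simp only [pvM1, hlt, if_pos]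
        exact pvM1_zero key ys y hy
      · have h' : List.find? (fun f => key f == 0) ys = some z := by
          rwa [List.find?_cons_of_neg (by simp [hy])] at h
        simp only [pvM1]
        by_cases hc : key y < key x
        · rw [if_pos hc]; exact ih y z hy h'
        · rw [if_neg hc]; exact ih x z hx h'

-- character-level match predicate (the simp normal form of 'q in f.upper()')
def pvPred (q f : String) : Bool := PySem.Chars.isIn q.toList (PySem.Chars.upper f.toList)

theorem pvScoreAux_cons (q : String) (qs : List String) (f : String) :
    pvScoreAux (PySem.Str.upper f) (q :: qs) =
      if pvPred q f then 0 else 1 + pvScoreAux (PySem.Str.upper f) qs := by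
  simp [pvScoreAux, pvPred]

theorem pvFilesLoop_eq_find? (q : String) (files : List String) :
    pvFilesLoop files q = List.find? (fun f => pvPred q f) files := by
  induction files with
  | nil => rfl
  | cons f rest ih =>
      have h' : PySem.Str.isIn q (PySem.Str.upper f) = pvPred q f := by simp [pvPred]
      simp only [pvFilesLoop, List.find?, h', ih]
      cases pvPred q f <;> simp

-- A's nested loops equal B's score-the-files-then-argmin phase, for any priority list
theorem pvMain (ps files : List String) :
    pvPriorityLoop ps files =
      match PySem.List.min? files (fun f => pvScoreAux (PySem.Str.upper f) ps) with
      | some best => if pvScoreAux (PySem.Str.upper best) ps < ps.length then some best else none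
      | none => none := by
  induction ps generalizing files with
  | nil =>
      cases files with
      | nil => rfl
      | cons x xs =>
          rw [min?_eq_pvM1]
          simp [pvPriorityLoop, pvScoreAux]
  | cons q qs ih =>
      simp only [pvPriorityLoop, pvFilesLoop_eq_find?]
      cases hfind : List.find? (fun f => pvPred q f) files with
      | some z =>
          have hzq : pvPred q z = true := List.find?_some hfind
          have hz0 : pvScoreAux (PySem.Str.upper z) (q :: qs) = 0 := by
            rw [pvScoreAux_cons, if_pos hzq]
          cases files with
          | nil => simp at hfind
          | cons x xs =>
              rw [min?_eq_pvM1]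
              have hM : pvM1 (fun f => pvScoreAux (PySem.Str.upper f) (q :: qs)) x xs = z := by
                by_cases hx : pvPred q x = true
                · have hzx : z = x := by
                    rw [List.find?_cons_of_pos hx] at hfind
                    exact (Option.some.inj hfind).symm
                  subst hzx
                  exact pvM1_zero _ xs _ hz0
                · have hx0 : pvScoreAux (PySem.Str.upper x) (q :: qs) ≠ 0 := by
                    rw [pvScoreAux_cons, if_neg hx]; omega
                  have hfind' : List.find? (fun f => pvPred q f) xs = some z := by
                    rwa [List.find?_cons_of_neg hx] at hfind
                  have hpred : (fun f => pvScoreAux (PySem.Str.upper f) (q :: qs) == 0) =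
                      (fun f => pvPred q f) := by
                    funext f
                    rw [pvScoreAux_cons]
                    by_cases hf : pvPred q f = true
                    · simp [hf]
                    · rw [Bool.not_eq_true] at hf; simp [hf]
                  exact pvM1_first_zero _ xs x z hx0 (by rw [hpred]; exact hfind')
              rw [hM]
              simp [hz0]
      | none =>
          have hnc : ∀ f ∈ files, pvPred q f = false := by
            intro f hf
            have := List.find?_eq_none.mp hfind f hf
            rwa [Bool.not_eq_true] at this
          cases files with
          | nil => simpa [pvPriorityLoop] using ih []
          | cons x xs =>
              rw [min?_eq_pvM1]
              have hcong : pvM1 (fun f => pvScoreAux (PySem.Str.upper f) (q :: qs)) x xs =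
                  pvM1 (fun f => pvScoreAux (PySem.Str.upper f) qs) x xs := by
                rw [pvM1_congr (fun f => pvScoreAux (PySem.Str.upper f) (q :: qs))
                      (fun f => 1 + pvScoreAux (PySem.Str.upper f) qs) xs x
                      (fun y hy => by simp [pvScoreAux_cons, hnc y hy])]
                exact pvM1_shift _ xs x
              rw [hcong]
              have hmem := pvM1_mem (fun f => pvScoreAux (PySem.Str.upper f) qs) xs x
              have hbest : pvScoreAux (PySem.Str.upper (pvM1 (fun f => pvScoreAux (PySem.Str.upper f) qs) x xs)) (q :: qs) =
                  1 + pvScoreAux (PySem.Str.upper (pvM1 (fun f => pvScoreAux (PySem.Str.upper f) qs) x xs)) qs := by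
                rw [pvScoreAux_cons, if_neg (by simp [hnc _ hmem])]
              rw [ih (x :: xs), min?_eq_pvM1]
              simp only [hbest, List.length_cons]
              by_cases hlt : pvScoreAux (PySem.Str.upper (pvM1 (fun f => pvScoreAux (PySem.Str.upper f) qs) x xs)) qs < qs.length
              · have h2 : 1 + pvScoreAux (PySem.Str.upper (pvM1 (fun f => pvScoreAux (PySem.Str.upper f) qs) x xs)) qs < qs.length + 1 := by omega
                rw [if_pos hlt, if_pos h2]
              · have h2 : ¬ (1 + pvScoreAux (PySem.Str.upper (pvM1 (fun f => pvScoreAux (PySem.Str.upper f) qs) x xs)) qs < qs.length + 1) := by omega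
                rw [if_neg hlt, if_neg h2]

theorem pvQuantLoop_eq_find? (qu : String) (files : List String) :
    pvQuantLoop files qu = List.find? (fun f => PySem.Str.isIn qu (PySem.Str.upper f)) files := by
  induction files with
  | nil => rfl
  | cons f rest ih =>
      have h' : PySem.Str.isIn qu (PySem.Str.upper f) = pvPred qu f := by simp [pvPred]
      simp only [pvQuantLoop, List.find?, h', ih]
      cases pvPred qu f <;> simp

-- the shared default phase of the two ports agree
theorem pvDefault_eq (files : List String) :
    (match pvPriorityLoop pvPriority files with
     | some f => f
     | none => (PySem.List.pyGet? files 0).getD "") =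
    (match PySem.List.min? files pvScore with
     | some best => if pvScore best < pvPriority.length then best else (PySem.List.pyGet? files 0).getD ""
     | none => (PySem.List.pyGet? files 0).getD "") := by
  have hsc : pvScore = fun f => pvScoreAux (PySem.Str.upper f) pvPriority := rfl
  rw [pvMain pvPriority files, hsc]
  cases hm : PySem.List.min? files (fun f => pvScoreAux (PySem.Str.upper f) pvPriority) with
  | none => simp
  | some best =>
      by_cases hlt : pvScoreAux (PySem.Str.upper best) pvPriority < pvPriority.length <;> simp [hlt]

-- ===== VERDICT (by name: the statement is the Claim_ definition above) =====
theorem select_gguf_py_spec : Claim_equal_select_gguf_py := by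
  intro files quant _ _
  unfold Spec_select_gguf_py select_gguf_py select_gguf_py_alt
  cases quant with
  | none => exact pvDefault_eq files
  | some q =>
      by_cases hq : q = ""
      · simp only [hq]
        exact pvDefault_eq files
      · simp only [if_neg hq, pvQuantLoop_eq_find?]
        cases List.find? (fun f => PySem.Str.isIn (PySem.Str.upper q) (PySem.Str.upper f)) files with
        | some f => rfl
        | none => exact pvDefault_eq files
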